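-- pv_equiv track=rewrite | github.com/comprna/SWARM | SWARM_scripts/predict/predict_model1_parallel_modsam.py | get_MM_tag
-- ===== SOURCE A (Python) =====
-- def get_MM_tag(MMs):
--     point = 0
--     MM = "N+N"
--     for pos in MMs:
--         delta = int(pos) - point
--         MM+=f",{delta}"
--         point+= 1 + delta
--     return MM + ";"
-- ===== SOURCE B (Python) =====
-- def get_MM_tag(MMs):
--     positions = [-1] + [int(p) for p in MMs]
--     deltas = [b - a - 1 for a, b in zip(positions, positions[1:])]
--     return "N+N" + "".join(f",{d}" for d in deltas) + ";"
-- ===== Notes on version B (the rewrite author's own statement) =====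
-- stated objective: alternative
-- what changed: Replaces the stateful running `point` accumulator with a sentinel-prefixed positions list and a direct pairwise-difference pass assembled by join.
import Mathlib
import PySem

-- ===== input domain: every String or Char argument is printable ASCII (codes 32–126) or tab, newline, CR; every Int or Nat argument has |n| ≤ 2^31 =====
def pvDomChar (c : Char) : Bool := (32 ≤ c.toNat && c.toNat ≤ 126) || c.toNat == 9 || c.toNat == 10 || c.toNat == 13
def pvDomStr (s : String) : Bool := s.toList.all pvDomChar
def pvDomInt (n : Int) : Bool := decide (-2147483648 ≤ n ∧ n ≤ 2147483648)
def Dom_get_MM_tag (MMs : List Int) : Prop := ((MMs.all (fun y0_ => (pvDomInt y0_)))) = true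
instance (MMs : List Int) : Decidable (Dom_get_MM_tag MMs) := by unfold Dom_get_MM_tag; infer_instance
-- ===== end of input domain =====

-- B eliminates A's running `point` accumulator by a sentinel-prefixed positions list and pairwise differences (alternative decomposition).
-- ===== PORT A =====
def get_MM_tag_loop : List Int → Int → String → String
  | [], _, MM => MM ++ ";"
  | pos :: rest, point, MM =>
      get_MM_tag_loop rest (point + (1 + (pos - point))) (MM ++ "," ++ PySem.Int.toStr (pos - point))

def get_MM_tag (MMs : List Int) : String := get_MM_tag_loop MMs 0 "N+N"

-- ===== PORT B =====
def get_MM_tag_alt (MMs : List Int) : String :=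
  let positions : List Int := -1 :: MMs
  let deltas := List.zipWith (fun a b => b - a - 1) positions positions.tail
  "N+N" ++ String.join (deltas.map (fun d => "," ++ PySem.Int.toStr d)) ++ ";"

-- ===== PRECONDITION & SPEC =====
def Spec_get_MM_tag (MMs : List Int) (out : String) : Prop := out = get_MM_tag_alt MMs
instance (MMs : List Int) (out : String) : Decidable (Spec_get_MM_tag MMs out) := by unfold Spec_get_MM_tag; infer_instance

-- ===== CLAIM (what is proved, stated in full; the proofs are below) =====
def Claim_equal_get_MM_tag : Prop := ∀ (MMs : List Int), Dom_get_MM_tag MMs → Spec_get_MM_tag MMs (get_MM_tag MMs)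

-- ===== LEMMAS AND PROOFS =====

-- ===== VERDICT (by name: the statement is the Claim_ definition above) =====
theorem pv_foldl_append (l : List String) : ∀ (a : String),
    List.foldl (fun r s => r ++ s) a l = a ++ List.foldl (fun r s => r ++ s) "" l := by
  induction l with
  | nil => simp
  | cons y l ih =>
      intro a
      simp only [List.foldl_cons]
      rw [ih (a ++ y), ih ("" ++ y)]
      simp [String.append_assoc]

theorem pv_join_cons (x : String) (l : List String) :
    String.join (x :: l) = x ++ String.join l := by
  simp only [String.join, List.foldl_cons]
  rw [pv_foldl_append]
  simp

theorem get_MM_tag_loop_eq (MMs : List Int) : ∀ (p : Int) (s : String),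
    get_MM_tag_loop MMs (p + 1) s =
      s ++ String.join ((List.zipWith (fun a b => b - a - 1) (p :: MMs) MMs).map
        (fun d => "," ++ PySem.Int.toStr d)) ++ ";" := by
  induction MMs with
  | nil => intro p s; simp [get_MM_tag_loop, String.join]
  | cons pos rest ih =>
      intro p s
      rw [show get_MM_tag_loop (pos :: rest) (p + 1) s =
          get_MM_tag_loop rest ((p + 1) + (1 + (pos - (p + 1))))
            (s ++ "," ++ PySem.Int.toStr (pos - (p + 1))) from rfl]
      rw [show (p + 1) + (1 + (pos - (p + 1))) = pos + 1 from by ring, ih pos]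
      rw [show pos - (p + 1) = pos - p - 1 from by ring]
      simp only [List.zipWith, List.map, pv_join_cons]
      simp [String.append_assoc]

theorem get_MM_tag_spec : Claim_equal_get_MM_tag := by
  intro MMs _
  unfold Spec_get_MM_tag get_MM_tag get_MM_tag_alt
  have := get_MM_tag_loop_eq MMs (-1) "N+N"
  simpa using this
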